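-- pv_equiv track=rewrite | github.com/cloudshare/NadavAgentRepo | src/parsers/json_reporter.py | _error_priority
-- ===== SOURCE A (Python) =====
-- _PRIORITY_NETWORK = 3
--
-- _PRIORITY_TIMEOUT = 2
--
-- _PRIORITY_ASSERTION = 1
--
-- _PRIORITY_UNKNOWN = 0
--
-- _NETWORK_KEYWORDS = [
--     "net::ERR",
--     "ERR_CONNECTION",
--     "navigation timeout",
--     "ERR_ABORTED",
--     "Failed to navigate",
-- ]
--
-- _TIMEOUT_KEYWORDS = [
--     "Timeout",
--     "waiting for",
--     "exceeded",
-- ]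
--
-- _ASSERTION_KEYWORDS = [
--     "Expected",
--     "toBe",
--     "toEqual",
--     "expect(",
--     "received",
-- ]
--
-- def _error_priority(message: str) -> int:
--     """Return priority rank for an error message (higher = more root-cause-like)."""
--     if not message:
--         return _PRIORITY_UNKNOWN
--     for keyword in _NETWORK_KEYWORDS:
--         if keyword in message:
--             return _PRIORITY_NETWORK
--     for keyword in _TIMEOUT_KEYWORDS:
--         if keyword in message:
--             return _PRIORITY_TIMEOUT
--     for keyword in _ASSERTION_KEYWORDS:
--         if keyword in message:
--             return _PRIORITY_ASSERTION
--     return _PRIORITY_UNKNOWN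
-- ===== SOURCE B (Python) =====
-- _PRIORITY_NETWORK = 3
-- _PRIORITY_TIMEOUT = 2
-- _PRIORITY_ASSERTION = 1
-- _PRIORITY_UNKNOWN = 0
--
-- _NETWORK_KEYWORDS = [
--     "net::ERR",
--     "ERR_CONNECTION",
--     "navigation timeout",
--     "ERR_ABORTED",
--     "Failed to navigate",
-- ]
--
-- _TIMEOUT_KEYWORDS = [
--     "Timeout",
--     "waiting for",
--     "exceeded",
-- ]
--
-- _ASSERTION_KEYWORDS = [
--     "Expected",
--     "toBe",
--     "toEqual",
--     "expect(",
--     "received",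
-- ]
--
-- _TIERS = [
--     (_PRIORITY_NETWORK, _NETWORK_KEYWORDS),
--     (_PRIORITY_TIMEOUT, _TIMEOUT_KEYWORDS),
--     (_PRIORITY_ASSERTION, _ASSERTION_KEYWORDS),
-- ]
--
-- def _error_priority(message: str) -> int:
--     """Return priority rank for an error message (higher = more root-cause-like)."""
--     matched = [p for p, kws in _TIERS if any(k in message for k in kws)]
--     return max(matched, default=_PRIORITY_UNKNOWN)
-- ===== Notes on version B (the rewrite author's own statement) =====
-- stated objective: simpler
-- what changed: Replaced the empty-string guard and three sequential keyword loops with early returns by one table of (priority, keywords) tiers aggregated with max over the matched priorities (default 0); no guard is needed since no keyword occurs in the empty string.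
import Mathlib
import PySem

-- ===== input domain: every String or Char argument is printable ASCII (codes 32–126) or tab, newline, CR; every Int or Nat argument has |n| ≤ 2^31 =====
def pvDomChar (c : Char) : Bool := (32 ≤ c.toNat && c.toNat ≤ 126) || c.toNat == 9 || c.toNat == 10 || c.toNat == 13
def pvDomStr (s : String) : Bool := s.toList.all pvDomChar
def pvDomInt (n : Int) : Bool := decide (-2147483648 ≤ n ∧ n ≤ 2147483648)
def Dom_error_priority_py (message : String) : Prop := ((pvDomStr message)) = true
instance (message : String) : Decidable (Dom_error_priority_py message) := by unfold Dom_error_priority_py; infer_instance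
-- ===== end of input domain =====

-- B replaces A's empty-guard and three sequential early-return loops by one (priority, keywords) table aggregated with max (objective: simpler).


-- ===== PORT A =====
def pvNetworkKw : List String :=
  ["net::ERR", "ERR_CONNECTION", "navigation timeout", "ERR_ABORTED", "Failed to navigate"]
def pvTimeoutKw : List String := ["Timeout", "waiting for", "exceeded"]
def pvAssertionKw : List String := ["Expected", "toBe", "toEqual", "expect(", "received"]

-- 'for keyword in kws: if keyword in message: return True' loop shape
def pvScan (message : String) : List String → Bool
  | [] => false
  | k :: rest => if PySem.Str.isIn k message then true else pvScan message rest

def error_priority_py (message : String) : Int :=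
  if message = "" then 0
  else if pvScan message pvNetworkKw then 3
  else if pvScan message pvTimeoutKw then 2
  else if pvScan message pvAssertionKw then 1
  else 0

-- ===== PORT B =====
-- Source B's _TIERS is built from the same keyword-list constants
def pvTiers : List (Int × List String) :=
  [(3, pvNetworkKw), (2, pvTimeoutKw), (1, pvAssertionKw)]

def error_priority_py_alt (message : String) : Int :=
  (PySem.List.max? ((pvTiers.filter
      (fun t => t.2.any (fun k => PySem.Str.isIn k message))).map (fun t => t.1)) (fun x => x)).getD 0

-- ===== PRECONDITION & SPEC =====
def Spec_error_priority_py (message : String) (out : Int) : Prop := out = error_priority_py_alt message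
instance (message : String) (out : Int) : Decidable (Spec_error_priority_py message out) := by unfold Spec_error_priority_py; infer_instance

-- ===== CLAIM (what is proved, stated in full; the proofs are below) =====
def Claim_equal_error_priority_py : Prop := ∀ (message : String), Dom_error_priority_py message → Spec_error_priority_py message (error_priority_py message)

-- ===== LEMMAS AND PROOFS =====
theorem pvScan_eq_any (message : String) (kws : List String) :
    pvScan message kws = kws.any (fun k => PySem.Str.isIn k message) := by
  induction kws with
  | nil => rfl
  | cons k rest ih => cases h : PySem.Str.isIn k message <;> simp [pvScan, ih]

-- ===== VERDICT (by name: the statement is the Claim_ definition above) =====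
theorem error_priority_py_spec : Claim_equal_error_priority_py := by
  intro message _
  unfold Spec_error_priority_py error_priority_py error_priority_py_alt pvTiers
  simp only [pvScan_eq_any, List.filter]
  by_cases hm : message = ""
  · subst hm; decide
  · rcases hn : pvNetworkKw.any (fun k => PySem.Str.isIn k message) <;>
    rcases ht : pvTimeoutKw.any (fun k => PySem.Str.isIn k message) <;>
    rcases ha : pvAssertionKw.any (fun k => PySem.Str.isIn k message) <;>
    simp [PySem.List.max?, hm]
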